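-- pv_equiv track=rewrite | github.com/symetryml/o11y | otel_synth/otel_synth/trace_profiler.py | _detect_repeating_groups
-- ===== SOURCE A (Python) =====
-- def _detect_repeating_groups(sigs: list[str]) -> list[tuple[list[str], int, int]]:
--     """Detect repeating subsequences in a list of child signatures.
--
--     Returns list of (group_sigs, start_index, group_size) tuples.
--     Returns empty list if no significant repetition found.
--     """
--     if len(sigs) <= 2:
--         return []
--
--     # Try group sizes from 1 up to half the list
--     for k in range(1, len(sigs) // 2 + 1):
--         group = sigs[:k]
--         count = 0
--         for i in range(0, len(sigs) - k + 1, k):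
--             if sigs[i:i + k] == group:
--                 count += 1
--             else:
--                 break
--         # Need at least 3 repeats or cover >50% of children to be significant
--         if count >= 3 or (count >= 2 and count * k >= len(sigs) * 0.5):
--             return [(group, 0, k)]
--
--     return []
-- ===== SOURCE B (Python) =====
-- def _significant(sigs: list[str], n: int, k: int) -> bool:
--     """Is period k significant? Count of leading k-blocks equal to the prefix
--     block is lcp(sigs, sigs[k:]) // k + 1, where lcp is the longest common
--     prefix length of the list and its k-shift."""
--     lcp = 0
--     for x, y in zip(sigs, sigs[k:]):
--         if x != y:
--             break
--         lcp += 1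
--     count = (lcp + k) // k
--     return count >= 3 or (count >= 2 and 2 * count * k >= n)
--
--
-- def _detect_repeating_groups(sigs: list[str]) -> list[tuple[list[str], int, int]]:
--     """Detect repeating subsequences in a list of child signatures.
--
--     Instead of slicing out and comparing whole blocks per candidate size k,
--     compute the longest common prefix of the list with its own k-shift
--     (self-overlap, as in the Z-algorithm); its length divided by k gives the
--     number of matching leading blocks directly. The first significant k is
--     picked with next() over a generator.
--     """
--     n = len(sigs)
--     if n <= 2:
--         return []
--     k = next((k for k in range(1, n // 2 + 1) if _significant(sigs, n, k)), None)
--     return [] if k is None else [(sigs[:k], 0, k)]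
-- ===== Notes on version B (the rewrite author's own statement) =====
-- stated objective: alternative
-- what changed: Replaces A's per-k inner loop that slices out each k-block and compares it to the prefix group by computing the longest common prefix of the list with its own k-shift (zip self-overlap, as in the Z-algorithm); lcp//k + 1 is the block count, the first significant k is selected with next() over a generator instead of an early-return loop, and the float significance test becomes exact integer arithmetic.
import Mathlib
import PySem

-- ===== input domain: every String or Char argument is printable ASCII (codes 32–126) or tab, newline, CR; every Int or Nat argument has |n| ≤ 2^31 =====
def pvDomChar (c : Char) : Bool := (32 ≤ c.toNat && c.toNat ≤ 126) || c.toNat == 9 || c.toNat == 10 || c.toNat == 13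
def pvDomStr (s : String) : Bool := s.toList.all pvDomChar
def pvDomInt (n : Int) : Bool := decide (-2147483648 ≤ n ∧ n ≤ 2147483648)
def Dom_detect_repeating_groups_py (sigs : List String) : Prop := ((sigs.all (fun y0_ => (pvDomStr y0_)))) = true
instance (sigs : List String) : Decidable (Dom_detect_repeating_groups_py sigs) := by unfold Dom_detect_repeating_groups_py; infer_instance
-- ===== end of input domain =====

-- B replaces A's per-k block-slice-and-compare inner loop by the longest common
-- prefix of the list with its own k-shift (Z-algorithm-style self-overlap):
-- lcp // k + 1 is the block count; the first significant k is picked with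
-- next() over a generator. Alternative decomposition, same asymptotic cost.

-- ===== PORT A =====
-- inner loop 'for i in range(0, len(sigs)-k+1, k): if sigs[i:i+k]==group: count+=1 else: break'
def pvACount (sigs group : List String) (k : Int) : List Int → Int
  | [] => 0
  | i :: rest =>
      if PySem.List.slice sigs (some i) (some (i + k)) == group then
        1 + pvACount sigs group k rest
      else 0

-- outer loop 'for k in range(1, len(sigs)//2 + 1): …' with early return;
-- the float test 'count * k >= len(sigs) * 0.5' is exact for |len| ≤ 2^31, ported as 2*count*k ≥ n
def pvALoop (sigs : List String) (n : Int) : List Int → List (List String × Int × Int)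
  | [] => []
  | k :: rest =>
      let group := PySem.List.slice sigs (some 0) (some k)
      let count := pvACount sigs group k (PySem.List.pyRange 0 (n - k + 1) k)
      if count ≥ 3 ∨ (count ≥ 2 ∧ 2 * count * k ≥ n) then [(group, 0, k)]
      else pvALoop sigs n rest

def detect_repeating_groups_py (sigs : List String) : List (List String × Int × Int) :=
  let n : Int := sigs.length
  if n ≤ 2 then []
  else pvALoop sigs n (PySem.List.pyRange 1 (PySem.Int.floordiv n 2 + 1) 1)

-- ===== PORT B =====
-- '_significant': the for-zip-break loop counts the leading matching pairs of
-- zip(sigs, sigs[k:]), i.e. the length of takeWhile (==) on the zip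
def pvSignificant (sigs : List String) (n k : Int) : Bool :=
  let lcp : Int :=
    ((sigs.zip (PySem.List.slice sigs (some k) none)).takeWhile (fun p => p.1 == p.2)).length
  let count := PySem.Int.floordiv (lcp + k) k
  decide (count ≥ 3 ∨ (count ≥ 2 ∧ 2 * count * k ≥ n))

-- 'next((k for k in range(1, n//2+1) if _significant(sigs, n, k)), None)' → find?
def detect_repeating_groups_py_alt (sigs : List String) : List (List String × Int × Int) :=
  let n : Int := sigs.length
  if n ≤ 2 then []
  else
    match (PySem.List.pyRange 1 (PySem.Int.floordiv n 2 + 1) 1).find?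
        (fun k => pvSignificant sigs n k) with
    | none => []
    | some k => [(PySem.List.slice sigs (some 0) (some k), 0, k)]

-- ===== PRECONDITION & SPEC =====
def Spec_detect_repeating_groups_py (sigs : List String) (out : List (List String × Int × Int)) : Prop := out = detect_repeating_groups_py_alt sigs
instance (sigs : List String) (out : List (List String × Int × Int)) : Decidable (Spec_detect_repeating_groups_py sigs out) := by unfold Spec_detect_repeating_groups_py; infer_instance

-- ===== CLAIM (what is proved, stated in full; the proofs are below) =====
def Claim_equal_detect_repeating_groups_py : Prop := ∀ (sigs : List String), Dom_detect_repeating_groups_py sigs → Spec_detect_repeating_groups_py sigs (detect_repeating_groups_py sigs)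

-- ===== LEMMAS AND PROOFS =====

-- proof-side element view (all indices used are in range, so the default never shows)
def pvG (s : List String) (i : Nat) : String := s.getD i ""

theorem pvG_get? (s : List String) (i : Nat) (h : i < s.length) :
    s[i]? = some (pvG s i) := by
  simp [pvG, List.getD, List.getElem?_eq_getElem h]

theorem pvG_eq_getElem (s : List String) (i : Nat) (h : i < s.length) :
    pvG s i = s[i]'h := by
  simp [pvG, List.getD, List.getElem?_eq_getElem h]

-- characterization of takeWhile's length (option-valued, so no dependent proofs)
theorem pvTakeWhile_spec {α : Type} (q : α → Bool) (L : List α) :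
    (L.takeWhile q).length ≤ L.length ∧
    (∀ i, i < (L.takeWhile q).length → (L[i]?).map q = some true) ∧
    ((L.takeWhile q).length = L.length ∨ (L[(L.takeWhile q).length]?).map q = some false) := by
  induction L with
  | nil =>
      refine ⟨le_refl _, ?_, Or.inl rfl⟩
      intro i hi; simp at hi
  | cons a t ih =>
      obtain ⟨ih1, ih2, ih3⟩ := ih
      by_cases hq : q a = true
      · have hT : (a :: t).takeWhile q = a :: t.takeWhile q := by simp [hq]
        rw [hT]
        refine ⟨by simp only [List.length_cons]; omega, ?_, ?_⟩
        · intro i hi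
          cases i with
          | zero => simp [hq]
          | succ j =>
              simp only [List.length_cons] at hi
              simpa using ih2 j (by omega)
        · rcases ih3 with h | hf
          · left; simp [h]
          · right; simpa using hf
      · have hq' : q a = false := by simpa using hq
        have hT : (a :: t).takeWhile q = ([] : List α) := by simp [hq']
        rw [hT]
        refine ⟨by simp, ?_, Or.inr (by simp [hq'])⟩
        intro i hi; simp at hi

-- telescoping: a period-kn run pushes every block element back to the prefix
theorem pvTele (s : List String) (kn p : Nat)
    (hper : ∀ i, kn ≤ i → i < p → pvG s i = pvG s (i - kn)) :
    ∀ b t, t < kn → (b * kn + t < p ∨ b = 0) → pvG s (b * kn + t) = pvG s t := by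
  intro b
  induction b with
  | zero => intro t _ _; simp
  | succ c ih =>
      intro t ht hb
      rcases hb with hb | hb
      · have h1 : pvG s ((c + 1) * kn + t) = pvG s (c * kn + t) := by
          have hh := hper ((c + 1) * kn + t) (by nlinarith) hb
          have harg : (c + 1) * kn + t - kn = c * kn + t := by
            rw [Nat.succ_mul]; omega
          rw [harg] at hh; exact hh
        rw [h1]
        apply ih t ht
        left
        have : c * kn + t < (c + 1) * kn + t := by rw [Nat.succ_mul]; omega
        omega
      · omega

-- a block slice equals the prefix group iff the shifted elements agree pointwise
theorem pvBlock_iff (s : List String) (a kn : Nat) (h : a + kn ≤ s.length) :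
    ((s.drop a).take kn = s.take kn) ↔ (∀ t, t < kn → pvG s (a + t) = pvG s t) := by
  constructor
  · intro hEq t ht
    have h1 : ((s.drop a).take kn)[t]? = (s.take kn)[t]? := by rw [hEq]
    rw [List.getElem?_take_of_lt ht, List.getElem?_take_of_lt ht, List.getElem?_drop,
      pvG_get? s (a + t) (by omega), pvG_get? s t (by omega)] at h1
    exact Option.some_injective _ h1
  · intro hpt
    apply List.ext_getElem?
    intro t
    by_cases ht : t < kn
    · rw [List.getElem?_take_of_lt ht, List.getElem?_take_of_lt ht, List.getElem?_drop,
        pvG_get? s (a + t) (by omega), pvG_get? s t (by omega), hpt t ht]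
    · have e1 : ((s.drop a).take kn)[t]? = none := by
        rw [List.getElem?_eq_none]; simp; omega
      have e2 : (s.take kn)[t]? = none := by
        rw [List.getElem?_eq_none]; simp; omega
      rw [e1, e2]

-- pvACount counts exactly the leading run of matching blocks
theorem pvACount_eq (s group : List String) (kI : Int) :
    ∀ (L : List Int) (c : Nat) (hc : c ≤ L.length),
      (∀ idx (h : idx < c),
        (PySem.List.slice s (some (L[idx]'(by omega))) (some ((L[idx]'(by omega)) + kI)) == group) = true) →
      (c = L.length ∨ ∃ h : c < L.length,
        (PySem.List.slice s (some (L[c]'h)) (some ((L[c]'h) + kI)) == group) = false) →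
      pvACount s group kI L = (c : Int) := by
  intro L
  induction L with
  | nil =>
      intro c hc _ _
      have : c = 0 := by simpa using hc
      subst this
      simp [pvACount]
  | cons i rest ih =>
      intro c hc hmatch hstop
      cases c with
      | zero =>
          rcases hstop with h | ⟨h, hfalse⟩
          · simp at h
          · simp only [List.getElem_cons_zero] at hfalse
            simp [pvACount, hfalse]
      | succ c' =>
          have h0 := hmatch 0 (Nat.succ_pos c')
          simp only [List.getElem_cons_zero] at h0
          have hstep : pvACount s group kI (i :: rest) = 1 + pvACount s group kI rest := by
            simp [pvACount, h0]
          rw [hstep, ih c' (by simpa using hc)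
            (fun idx h => by simpa using hmatch (idx + 1) (by omega))
            (by
              rcases hstop with h | ⟨h, hfalse⟩
              · left; simpa using h
              · right; exact ⟨by simpa using h, by simpa using hfalse⟩)]
          omega

-- the central per-k identity: A's block count = (run length r) / k for any r
-- satisfying the maximal-period-run specification
theorem pvCount_eq (s : List String) (kn : Nat) (r : Nat) (hk : 1 ≤ kn) (h2 : 2 * kn ≤ s.length)
    (hr1 : kn ≤ r) (hr2 : r ≤ s.length)
    (hrun : ∀ i, kn ≤ i → i < r → pvG s i = pvG s (i - kn))
    (hstop : r = s.length ∨ pvG s r ≠ pvG s (r - kn)) :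
    pvACount s (s.take kn) (kn : Int)
        (PySem.List.pyRange 0 ((s.length : Int) - (kn : Int) + 1) (kn : Int)) =
      ((r / kn : Nat) : Int) := by
  set n := s.length with hn
  set m := r / kn with hm
  set q1 := n / kn with hq1
  have hmul : m * kn ≤ r := Nat.div_mul_le_self r kn
  have hrq : r = m * kn + r % kn := by rw [hm, mul_comm]; exact (Nat.div_add_mod r kn).symm
  have hmlt : r % kn < kn := Nat.mod_lt r (by omega)
  have hrmod : r < (m + 1) * kn := by rw [Nat.succ_mul]; omega
  have hmq : m ≤ q1 := Nat.div_le_div_right hr2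
  have hm1 : 1 ≤ m := by rw [hm]; exact (Nat.one_le_div_iff (by omega)).mpr hr1
  have hq1n : q1 * kn ≤ n := Nat.div_mul_le_self n kn
  -- rewrite the range into multiples of kn
  have hlen : (if (0 : Int) < (n : Int) - (kn : Int) + 1
      then ((((n : Int) - (kn : Int) + 1) - 0 + (kn : Int) - 1) / (kn : Int)).toNat else 0) = q1 := by
    rw [if_pos (by omega)]
    have h3 : (((n : Int) - (kn : Int) + 1) - 0 + (kn : Int) - 1) = (n : Int) := by ring
    rw [h3]
    have h4 : ((n : Int) / (kn : Int)) = ((n / kn : Nat) : Int) := by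
      exact_mod_cast (Int.natCast_div n kn).symm
    rw [h4, Int.toNat_natCast, hq1]
  rw [PySem.List.pyRange_of_pos 0 ((n : Int) - (kn : Int) + 1) (by omega), hlen]
  -- each full block idx satisfies (idx+1)*kn ≤ n, so pvBlock_iff applies
  have hblock : ∀ idx, idx + 1 ≤ q1 →
      (((s.drop (kn * idx)).take kn = s.take kn) ↔
        ∀ t, t < kn → pvG s (kn * idx + t) = pvG s t) := by
    intro idx hidx
    apply pvBlock_iff
    calc kn * idx + kn = (idx + 1) * kn := by rw [Nat.succ_mul]; ring
    _ ≤ q1 * kn := Nat.mul_le_mul_right _ hidx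
    _ ≤ n := hq1n
  have hsliceEq : ∀ idx : Nat,
      PySem.List.slice s (some (0 + (kn : Int) * (idx : Int)))
        (some ((0 + (kn : Int) * (idx : Int)) + (kn : Int))) = (s.drop (kn * idx)).take kn := by
    intro idx
    have h1 : (0 + (kn : Int) * (idx : Int)) = ((kn * idx : Nat) : Int) := by push_cast; ring
    rw [h1, PySem.List.slice_natCast_add s (kn * idx) kn]
  apply pvACount_eq s (s.take kn) (kn : Int) _ m (by simpa using hmq)
  · intro idx hidx
    simp only [List.getElem_map, List.getElem_range]
    rw [beq_iff_eq, hsliceEq idx, hblock idx (by omega)]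
    intro t ht
    rw [mul_comm kn idx]
    apply pvTele s kn r hrun idx t ht
    by_cases h0 : idx = 0
    · exact Or.inr h0
    · left
      calc idx * kn + t < (idx + 1) * kn := by rw [Nat.succ_mul]; omega
      _ ≤ m * kn := Nat.mul_le_mul_right _ (by omega)
      _ ≤ r := hmul
  · by_cases hcase : m = q1
    · left; simp [hcase]
    · right
      have hmq1 : m < q1 := lt_of_le_of_ne hmq hcase
      refine ⟨by simp; omega, ?_⟩
      simp only [List.getElem_map, List.getElem_range]
      rw [beq_eq_false_iff_ne, Ne, hsliceEq m, hblock m hmq1]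
      intro hmatch
      -- here r < n, and the mismatch at r contradicts block m matching
      have hrn : r < n := by
        by_contra hge
        have hreq : r = n := by omega
        rw [hreq] at hm
        exact hcase (hm.trans hq1.symm)
      have hne : pvG s r ≠ pvG s (r - kn) := by
        rcases hstop with h | h
        · omega
        · exact h
      apply hne
      have ht : r % kn < kn := hmlt
      have h1 : pvG s r = pvG s (r % kn) := by
        have hh := hmatch (r % kn) ht
        have harg : kn * m + r % kn = r := by rw [mul_comm kn m]; omega
        rw [harg] at hh; exact hh
      have h2 : pvG s (r - kn) = pvG s (r % kn) := by
        have hsub : (m - 1) * kn = m * kn - kn := Nat.sub_one_mul m kn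
        have hknm : kn ≤ m * kn := Nat.le_mul_of_pos_left kn (by omega)
        have harg : (m - 1) * kn + r % kn = r - kn := by omega
        have hh := pvTele s kn r hrun (m - 1) (r % kn) ht
          (by
            by_cases hm1' : m = 1
            · right; omega
            · left; omega)
        rw [harg] at hh; exact hh
      rw [h1, h2]

-- B's zip/takeWhile lcp yields a run r = lcp + k satisfying the spec of pvCount_eq,
-- so A's count equals B's (lcp + k) // k
theorem pvCountAB (s : List String) (kn : Nat) (hk : 1 ≤ kn) (h2 : 2 * kn ≤ s.length) :
    pvACount s (s.take kn) (kn : Int)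
        (PySem.List.pyRange 0 ((s.length : Int) - (kn : Int) + 1) (kn : Int)) =
      PySem.Int.floordiv
        ((((s.zip (s.drop kn)).takeWhile (fun p => p.1 == p.2)).length : Int) + (kn : Int))
        (kn : Int) := by
  obtain ⟨hle, htrue, hlast⟩ :=
    pvTakeWhile_spec (fun p : String × String => p.1 == p.2) (s.zip (s.drop kn))
  set p := ((s.zip (s.drop kn)).takeWhile (fun p : String × String => p.1 == p.2)).length with hp
  have hLlen : (s.zip (s.drop kn)).length = s.length - kn := by
    rw [List.length_zip, List.length_drop]
    omega
  have hple : p ≤ s.length - kn := by rw [← hLlen]; exact hle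
  have hzip : ∀ i, i < s.length - kn →
      (s.zip (s.drop kn))[i]? = some (pvG s i, pvG s (kn + i)) := by
    intro i hi
    have h1 : i < s.length := by omega
    have hd : i < (s.drop kn).length := by rw [List.length_drop]; omega
    have hlt : i < (s.zip (s.drop kn)).length := by omega
    rw [List.getElem?_eq_getElem hlt, List.getElem_zip]
    have e1 : s[i]'h1 = pvG s i := (pvG_eq_getElem s i h1).symm
    have e2 : (s.drop kn)[i]'hd = pvG s (kn + i) := by
      rw [List.getElem_drop]
      exact (pvG_eq_getElem s (kn + i) (by omega)).symm
    rw [e1, e2]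
  have hrun : ∀ i, kn ≤ i → i < p + kn → pvG s i = pvG s (i - kn) := by
    intro i hki hip
    have hj : i - kn < s.length - kn := by omega
    have hh := htrue (i - kn) (by omega)
    rw [hzip (i - kn) hj] at hh
    simp only [Option.map_some, Option.some.injEq, beq_iff_eq] at hh
    have harg : kn + (i - kn) = i := by omega
    rw [harg] at hh
    exact hh.symm
  have hstop : p + kn = s.length ∨ pvG s (p + kn) ≠ pvG s (p + kn - kn) := by
    rcases hlast with h | hf
    · left
      rw [hLlen] at h
      omega
    · right
      have hplt : p < s.length - kn := by
        by_contra hge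
        have hnone : (s.zip (s.drop kn))[p]? = none := by
          rw [List.getElem?_eq_none]
          omega
        rw [hnone] at hf
        simp at hf
      rw [hzip p hplt] at hf
      simp only [Option.map_some, Option.some.injEq, beq_eq_false_iff_ne] at hf
      have harg : p + kn - kn = p := by omega
      rw [harg]
      intro hcon
      apply hf
      have hc : kn + p = p + kn := by omega
      rw [hc, ← hcon]
  have hcast : (((p : Nat) : Int) + (kn : Int)) = ((p + kn : Nat) : Int) := by push_cast; ring
  rw [hcast, PySem.Int.floordiv_natCast]
  exact pvCount_eq s kn (p + kn) hk h2 (by omega) (by omega) hrun hstop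

-- the two outer traversals agree on any admissible list of group sizes
theorem pvLoop_find (s : List String) :
    ∀ ks : List Int, (∀ k ∈ ks, 1 ≤ k ∧ 2 * k ≤ (s.length : Int)) →
      pvALoop s (s.length : Int) ks =
        (match ks.find? (fun k => pvSignificant s (s.length : Int) k) with
          | none => []
          | some k => [(PySem.List.slice s (some 0) (some k), 0, k)]) := by
  intro ks
  induction ks with
  | nil => intro _; rfl
  | cons k rest ih =>
      intro hmem
      obtain ⟨hk1, hk2⟩ := hmem k (List.mem_cons_self ..)
      have hkn : k = ((k.toNat : Nat) : Int) := by omega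
      have hgroup : PySem.List.slice s (some 0) (some k) = s.take k.toNat := by
        rw [PySem.List.slice_zero_start, PySem.List.slice_to s (by omega : (0:Int) ≤ k)]
      have hdrop : PySem.List.slice s (some k) none = s.drop k.toNat := by
        rw [PySem.List.slice_from s (by omega : (0:Int) ≤ k)]
      have hcount : pvACount s (PySem.List.slice s (some 0) (some k)) k
          (PySem.List.pyRange 0 ((s.length : Int) - k + 1) k) =
          PySem.Int.floordiv
            ((((s.zip (PySem.List.slice s (some k) none)).takeWhile
                (fun p => p.1 == p.2)).length : Int) + k) k := by
        rw [hgroup, hdrop, hkn]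
        exact pvCountAB s k.toNat (by omega) (by omega)
      rw [pvALoop]
      simp only [hcount]
      by_cases hcond : pvSignificant s (s.length : Int) k = true
      · rw [List.find?_cons_of_pos hcond]
        rw [if_pos (by
          have := hcond
          unfold pvSignificant at this
          simpa using of_decide_eq_true this)]
      · rw [List.find?_cons_of_neg hcond]
        rw [if_neg (by
          intro hA
          apply hcond
          unfold pvSignificant
          simpa using decide_eq_true hA)]
        exact ih (fun k' hk' => hmem k' (List.mem_cons_of_mem _ hk'))

-- ===== VERDICT (by name: the statement is the Claim_ definition above) =====
theorem detect_repeating_groups_py_spec : Claim_equal_detect_repeating_groups_py := by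
  intro sigs _
  unfold Spec_detect_repeating_groups_py
  unfold detect_repeating_groups_py detect_repeating_groups_py_alt
  by_cases h : (sigs.length : Int) ≤ 2
  · simp [h]
  · simp only [h, if_neg, not_false_iff]
    apply pvLoop_find
    intro k hk
    rw [PySem.List.mem_pyRange_one] at hk
    rw [PySem.Int.floordiv_eq_ediv_of_pos (by omega)] at hk
    omega
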